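-- pv_equiv track=rewrite | github.com/Vogelmensch/bt | bishop.py | to_bit_reversed
-- ===== SOURCE A (Python) =====
-- def to_bit_reversed(hex_str):
--     hex_num = int(hex_str, base=16)
--     assert(hex_num >= 0 and hex_num < 256)
--
--     bit_str = format(hex_num, 'b')
--     # fill with zeros
--     while len(bit_str) < 8:
--         bit_str = '0' + bit_str
--
--     assert(len(bit_str) == 8)
--
--     rev = []
--     for i in range(7,0,-2):
--         bit_pair = bit_str[i-1] + bit_str[i]
--         rev.append(bit_pair)
--
--     return rev
-- ===== SOURCE B (Python) =====
-- def to_bit_reversed(hex_str):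
--     hex_num = int(hex_str, base=16)
--     assert(hex_num >= 0 and hex_num < 256)
--     return [format(hex_num // 4**k % 4, '02b') for k in range(4)]
-- ===== Notes on version B (the rewrite author's own statement) =====
-- stated objective: simpler
-- what changed: B extracts each 2-bit pair directly by integer arithmetic (hex_num // 4**k % 4 for k = 0..3) and formats it, instead of building an 8-character zero-padded binary string and slicing character pairs out of it in reverse
import Mathlib
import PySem

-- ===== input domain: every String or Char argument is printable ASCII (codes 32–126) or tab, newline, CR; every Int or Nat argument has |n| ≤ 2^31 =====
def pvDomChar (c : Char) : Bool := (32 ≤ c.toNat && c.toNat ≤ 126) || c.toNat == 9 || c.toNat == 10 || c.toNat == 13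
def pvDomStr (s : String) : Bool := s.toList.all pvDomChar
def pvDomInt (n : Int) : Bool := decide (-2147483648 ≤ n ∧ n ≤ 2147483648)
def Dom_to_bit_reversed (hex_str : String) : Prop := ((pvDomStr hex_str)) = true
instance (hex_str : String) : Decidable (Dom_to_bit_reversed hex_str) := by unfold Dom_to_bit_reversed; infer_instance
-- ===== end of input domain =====

-- B replaces A's padded-binary-string building and reversed character slicing by direct
-- arithmetic extraction of the four 2-bit pairs (hex_num // 4**k % 4); objective: simpler.

-- ===== PORT A =====

-- format(n, 'b') for n > 0: binary digits, most significant first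
-- (fuel-structured so the kernel can evaluate it; fuel 8 is exact for n < 256)
def pvBinDigits : Nat → Nat → List Char
  | 0, _ => []
  | fuel + 1, n =>
    if n = 0 then []
    else pvBinDigits fuel (n / 2) ++ [if n % 2 = 1 then '1' else '0']

-- format(hex_num, 'b') for hex_num ≥ 0 (A only reaches it with 0 ≤ hex_num < 256)
def pvFormatB (n : Nat) : List Char :=
  if n = 0 then ['0'] else pvBinDigits 8 n

-- the 'while len(bit_str) < 8: bit_str = '0' + bit_str' loop (fuel 8 suffices: each
-- step grows the list by one, so at most 8 iterations ever run)
def pvPad : Nat → List Char → List Char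
  | 0, s => s
  | fuel + 1, s => if s.length < 8 then pvPad fuel ('0' :: s) else s

def pvPadLoop (s : List Char) : List Char := pvPad 8 s

-- body of A after the asserts succeed; strings are handled as List Char and packed
-- into String only at the very end (a representation choice, exact on this data)
def pvCoreA (hex_num : Int) : List (List Char) :=
  let bit_str := pvPadLoop (pvFormatB hex_num.toNat)
  -- bit_str[i-1] + bit_str[i]; indices are in range (len = 8), so .getD is never hit
  (PySem.List.pyRange 7 0 (-2)).foldl
    (fun rev i =>
      rev ++ [[(PySem.List.pyGet? bit_str (i - 1)).getD ' ',
               (PySem.List.pyGet? bit_str i).getD ' ']]) []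

def to_bit_reversed (hex_str : String) : List String :=
  match PySem.Int.ofStrBase? hex_str 16 with
  | none => []  -- int() raises ValueError: outside Pre_
  | some hex_num =>
    if 0 ≤ hex_num ∧ hex_num < 256 then (pvCoreA hex_num).map String.ofList
    else []  -- assert fails: outside Pre_

-- ===== PORT B =====

-- format(v, '02b') as a char list: exact for 0 ≤ v < 4, the only values B feeds it
def pvFmt02b (v : Int) : List Char :=
  [if PySem.Int.floordiv v 2 = 1 then '1' else '0',
   if PySem.Int.mod v 2 = 1 then '1' else '0']

-- body of B after the assert succeeds (char lists, packed into String at the end)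
def pvCoreB (hex_num : Int) : List (List Char) :=
  (PySem.List.pyRange 0 4 1).map
    (fun k => pvFmt02b (PySem.Int.mod (PySem.Int.floordiv hex_num (4 ^ k.toNat)) 4))

def to_bit_reversed_alt (hex_str : String) : List String :=
  match PySem.Int.ofStrBase? hex_str 16 with
  | none => []  -- int() raises ValueError: outside Pre_
  | some hex_num =>
    if 0 ≤ hex_num ∧ hex_num < 256 then (pvCoreB hex_num).map String.ofList
    else []  -- assert fails: outside Pre_

-- ===== PRECONDITION & SPEC =====
-- Pre_: int(hex_str, 16) parses and yields a value in [0, 256) — exactly where A's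
-- int() call and its assert do not raise.
def Pre_to_bit_reversed (hex_str : String) : Prop :=
  (match PySem.Int.ofStrBase? hex_str 16 with
   | none => false
   | some n => decide (0 ≤ n ∧ n < 256)) = true
instance (hex_str : String) : Decidable (Pre_to_bit_reversed hex_str) := by
  unfold Pre_to_bit_reversed; infer_instance

def pvWitness_to_bit_reversed : String := "a5"

def Spec_to_bit_reversed (hex_str : String) (out : List String) : Prop := out = to_bit_reversed_alt hex_str
instance (hex_str : String) (out : List String) : Decidable (Spec_to_bit_reversed hex_str out) := by unfold Spec_to_bit_reversed; infer_instance

-- ===== CLAIM (what is proved, stated in full; the proofs are below) =====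
def Claim_equal_to_bit_reversed : Prop := ∀ (hex_str : String), Dom_to_bit_reversed hex_str → Pre_to_bit_reversed hex_str → Spec_to_bit_reversed hex_str (to_bit_reversed hex_str)

-- ===== LEMMAS AND PROOFS =====

set_option maxRecDepth 40000 in
theorem pvCore_eq : ∀ m : Nat, m < 256 → pvCoreA (↑m) = pvCoreB (↑m) := by decide

-- ===== VERDICT (by name: the statement is the Claim_ definition above) =====
theorem to_bit_reversed_spec : Claim_equal_to_bit_reversed := by
  intro hex_str _ hpre
  unfold Spec_to_bit_reversed to_bit_reversed to_bit_reversed_alt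
  unfold Pre_to_bit_reversed at hpre
  cases h : PySem.Int.ofStrBase? hex_str 16 with
  | none => simp
  | some n =>
    rw [h] at hpre
    simp only [decide_eq_true_eq] at hpre
    obtain ⟨h0, h256⟩ := hpre
    simp only [if_pos (And.intro h0 h256)]
    have hm : n = ((n.toNat : Nat) : Int) := (Int.toNat_of_nonneg h0).symm
    rw [hm, pvCore_eq n.toNat (by omega)]
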